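-- pv_equiv track=rewrite | github.com/idpacheco/Laboratorio1_ED1 | Estucturas/Analisis.py | obtenerCampo
-- ===== SOURCE A (Python) =====
-- def obtenerCampo(linea, numero_campo):
--     campo = ""
--     separadores = 0
--     i = 0
--
--     while i < len(linea):
--         char = linea[i]
--
--         if char == "|":
--             separadores += 1
--         elif separadores == numero_campo - 1:
--             campo += char
--         elif separadores >= numero_campo:
--             break
--
--         i += 1
--
--     return campo
-- ===== SOURCE B (Python) =====
-- def obtenerCampo(linea, numero_campo):
--     fields = linea.split('|')
--     idx = numero_campo - 1
--     if 0 <= idx < len(fields):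
--         return fields[idx]
--     return ""
-- ===== Notes on version B (the rewrite author's own statement) =====
-- stated objective: idiomatic
-- what changed: Replaces A's character-by-character while loop with a field-counter and break by a single split('|') followed by a bounds-checked index (numero_campo-1), returning '' when the index is out of range, matching A's value everywhere.
import Mathlib
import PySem

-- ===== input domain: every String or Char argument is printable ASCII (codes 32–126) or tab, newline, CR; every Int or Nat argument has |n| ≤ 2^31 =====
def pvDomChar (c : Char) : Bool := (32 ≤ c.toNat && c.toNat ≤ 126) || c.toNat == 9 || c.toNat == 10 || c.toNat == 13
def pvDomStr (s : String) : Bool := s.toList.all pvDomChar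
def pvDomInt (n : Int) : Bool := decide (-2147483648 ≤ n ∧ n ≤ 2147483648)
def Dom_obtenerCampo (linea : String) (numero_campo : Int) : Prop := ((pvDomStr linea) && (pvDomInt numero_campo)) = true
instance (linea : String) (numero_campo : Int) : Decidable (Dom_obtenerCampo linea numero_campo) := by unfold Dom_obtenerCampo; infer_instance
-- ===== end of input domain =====

-- ===== PORT A =====
-- B replaces A's char-by-char while loop with split('|') plus a bounds-checked index; return values proved equal everywhere.
-- Loop of A: walks chars keeping (campo, separadores); '|' increments the counter, chars of the
-- target field are appended, a char past the target field breaks.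
def obtenerCampoLoop (cs : List Char) (campo : List Char) (sep : Int) (n : Int) : List Char :=
  match cs with
  | [] => campo
  | c :: rest =>
    if c = '|' then obtenerCampoLoop rest campo (sep + 1) n
    else if sep = n - 1 then obtenerCampoLoop rest (campo ++ [c]) sep n
    else if sep ≥ n then campo            -- break
    else obtenerCampoLoop rest campo sep n

def obtenerCampo (linea : String) (numero_campo : Int) : String :=
  String.ofList (obtenerCampoLoop linea.toList [] 0 numero_campo)

-- ===== PORT B =====
def obtenerCampo_alt (linea : String) (numero_campo : Int) : String :=
  let fields := linea.toList.splitOn '|'     -- linea.split('|')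
  let idx := numero_campo - 1
  if 0 ≤ idx ∧ idx < fields.length then String.ofList (fields.getD idx.toNat [])
  else ""

-- ===== PRECONDITION & SPEC =====
def Spec_obtenerCampo (linea : String) (numero_campo : Int) (out : String) : Prop := out = obtenerCampo_alt linea numero_campo
instance (linea : String) (numero_campo : Int) (out : String) : Decidable (Spec_obtenerCampo linea numero_campo out) := by unfold Spec_obtenerCampo; infer_instance

-- ===== CLAIM (what is proved, stated in full; the proofs are below) =====
def Claim_equal_obtenerCampo : Prop := ∀ (linea : String) (numero_campo : Int), Dom_obtenerCampo linea numero_campo → Spec_obtenerCampo linea numero_campo (obtenerCampo linea numero_campo)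

-- ===== LEMMAS AND PROOFS =====

-- Once the separator counter is ≥ numero_campo the loop only skips pipes until it stops: the
-- accumulator is returned unchanged.
theorem loop_done (cs : List Char) (campo : List Char) (sep n : Int) (h : n ≤ sep) :
    obtenerCampoLoop cs campo sep n = campo := by
  induction cs generalizing sep with
  | nil => rfl
  | cons c rest ih =>
    by_cases hc : c = '|'
    · simp [obtenerCampoLoop, hc]; exact ih (sep + 1) (by omega)
    · simp [obtenerCampoLoop, hc]
      have h1 : ¬ sep = n - 1 := by omega
      have h2 : sep ≥ n := h
      simp [h1, h2]

-- In collecting mode (sep = numero_campo - 1) the loop appends exactly the chars up to the next pipe.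
theorem loop_collect (cs : List Char) (campo : List Char) (n : Int) :
    obtenerCampoLoop cs campo (n - 1) n = campo ++ cs.takeWhile (· ≠ '|') := by
  induction cs generalizing campo with
  | nil => simp [obtenerCampoLoop]
  | cons c rest ih =>
    by_cases hc : c = '|'
    · simp [obtenerCampoLoop, hc, loop_done rest campo n n le_rfl]
    · simp [obtenerCampoLoop, hc, ih (campo ++ [c])]

-- The head of splitOn is the chars up to the first pipe.
theorem splitOn_head (cs : List Char) :
    (cs.splitOn '|').getD 0 [] = cs.takeWhile (· ≠ '|') := by
  induction cs with
  | nil => simp [List.splitOn]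
  | cons c rest ih =>
    by_cases hc : c = '|'
    · simp [List.splitOn, List.splitOnP_cons, hc]
    · obtain ⟨f, tl, hft⟩ := List.exists_cons_of_ne_nil (List.splitOnP_ne_nil (· == '|') rest)
      simp only [List.splitOn] at ih ⊢
      rw [List.splitOnP_cons]
      simp only [hft] at ih ⊢
      simp [hc] at ih ⊢
      exact ih

-- Main invariant: started k fields before the target, the loop returns the k-th field of the split
-- (or [] when out of range, matching getD's default).
theorem loop_field (cs : List Char) (k : Nat) (n : Int) :
    obtenerCampoLoop cs [] (n - 1 - k) n = (cs.splitOn '|').getD k [] := by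
  induction cs generalizing k with
  | nil =>
    cases k <;> simp [obtenerCampoLoop, List.splitOn]
  | cons c rest ih =>
    by_cases hc : c = '|'
    · cases k with
      | zero =>
        simp [obtenerCampoLoop, hc, List.splitOn, List.splitOnP_cons,
          loop_done rest [] n n le_rfl]
      | succ j =>
        have : (n - 1 - (j + 1 : Nat) + 1 : Int) = n - 1 - j := by push_cast; ring
        simp only [obtenerCampoLoop, hc, this, ih j]
        simp [List.splitOn, List.splitOnP_cons]
    · obtain ⟨f, tl, hft⟩ := List.exists_cons_of_ne_nil (List.splitOnP_ne_nil (· == '|') rest)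
      cases k with
      | zero =>
        have hsep : (n - 1 - (0 : Nat) : Int) = n - 1 := by push_cast; ring
        rw [hsep]
        have := loop_collect (c :: rest) [] n
        simp [hc] at this
        simp only [this]
        have hh := splitOn_head (c :: rest)
        simp [List.splitOn, List.splitOnP_cons, hc, hft] at hh ⊢
        have hh2 := splitOn_head rest
        simp [List.splitOn, hft] at hh2
        simp [hh2]
      | succ j =>
        have h1 : ¬ (n - 1 - ((j : Int) + 1) = n - 1) := by omega
        have h2 : ¬ (n - 1 - ((j : Int) + 1) ≥ n) := by omega
        have h3 : (n - 1 - ((j + 1 : Nat) : Int)) = n - 1 - ((j : Int) + 1) := by push_cast; ring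
        simp only [obtenerCampoLoop, hc, h3, h1, h2, if_false]
        have h4 : (n - 1 - ((j : Int) + 1)) = n - 1 - ((j + 1 : Nat) : Int) := h3.symm
        rw [show (n - 1 - ((j : Int) + 1)) = n - 1 - (((j + 1 : Nat)) : Int) by push_cast; ring]
        rw [ih (j + 1)]
        simp [List.splitOn, List.splitOnP_cons, hc, hft]

-- ===== VERDICT (by name: the statement is the Claim_ definition above) =====
theorem obtenerCampo_spec : Claim_equal_obtenerCampo := by
  intro linea n _
  unfold Spec_obtenerCampo obtenerCampo obtenerCampo_alt
  by_cases hn : 1 ≤ n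
  · have hk : (n - 1 - ((n - 1).toNat : Int)) = 0 := by omega
    have := loop_field linea.toList (n - 1).toNat n
    rw [hk] at this
    rw [this]
    by_cases hlt : n - 1 < (linea.toList.splitOn '|').length
    · rw [if_pos ⟨by omega, hlt⟩]
    · have hge : (linea.toList.splitOn '|').length ≤ (n - 1).toNat := by omega
      rw [if_neg (fun h => by omega)]
      rw [List.getD_eq_default _ _ hge]
  · have h0 : n ≤ (0 : Int) := by omega
    rw [loop_done linea.toList [] 0 n h0]
    rw [if_neg (fun h => by omega)]
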